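-- pv_equiv track=rewrite | github.com/caseprepd-app/CaseSummarizer | tests/test_document_preview.py | _long_text
-- ===== SOURCE A (Python) =====
-- def _long_text(word_count=1000):
--     """Generate multi-paragraph text exceeding the default section size."""
--     paragraphs = []
--     words_left = word_count
--     while words_left > 0:
--         chunk = min(80, words_left)
--         paragraphs.append(" ".join(["word"] * chunk))
--         words_left -= chunk
--     return "\n".join(paragraphs)
-- ===== SOURCE B (Python) =====
-- def _long_text(word_count=1000):
--     """Generate multi-paragraph text exceeding the default section size."""
--     words = ["word"] * word_count
--     paragraphs = [" ".join(words[i:i + 80]) for i in range(0, len(words), 80)]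
--     return "\n".join(paragraphs)
-- ===== Notes on version B (the rewrite author's own statement) =====
-- stated objective: alternative
-- what changed: Replaces the decrementing while-loop with min() chunk arithmetic by materializing the full word list once and partitioning it into paragraphs with an index-stepped slice comprehension.
import Mathlib
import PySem

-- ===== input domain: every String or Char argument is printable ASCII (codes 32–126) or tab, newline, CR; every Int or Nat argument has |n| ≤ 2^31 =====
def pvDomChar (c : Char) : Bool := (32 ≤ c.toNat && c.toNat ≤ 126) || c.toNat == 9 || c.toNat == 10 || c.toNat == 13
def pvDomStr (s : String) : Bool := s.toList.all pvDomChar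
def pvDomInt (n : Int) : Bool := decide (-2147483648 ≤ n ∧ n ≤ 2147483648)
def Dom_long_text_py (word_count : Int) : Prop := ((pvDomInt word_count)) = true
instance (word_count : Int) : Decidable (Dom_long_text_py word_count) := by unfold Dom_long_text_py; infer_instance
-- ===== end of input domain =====

-- B replaces A's decrementing while-loop (min() chunk sizes) by building the flat word
-- list once and partitioning it into paragraphs by stepped slicing (objective: alternative).

-- ===== PORT A =====
-- the while-loop: paragraphs accumulator, words_left decremented by chunk = min(80, words_left)
def longTextLoopA (paragraphs : List String) (words_left : Int) : List String :=
  if _h : words_left > 0 then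
    longTextLoopA
      (paragraphs ++ [PySem.Str.join " " (List.replicate (min 80 words_left).toNat "word")])
      (words_left - min 80 words_left)
  else paragraphs
termination_by words_left.toNat
decreasing_by omega

def long_text_py (word_count : Int) : String :=
  PySem.Str.join "\n" (longTextLoopA [] word_count)

-- ===== PORT B =====
def long_text_py_alt (word_count : Int) : String :=
  -- words = ["word"] * word_count  (Python list multiplication: empty for count ≤ 0)
  let words : List String := List.replicate word_count.toNat "word"
  -- [" ".join(words[i:i+80]) for i in range(0, len(words), 80)]
  let paragraphs : List String :=
    (PySem.List.pyRange 0 (words.length : Int) 80).map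
      (fun i => PySem.Str.join " " (PySem.List.slice words (some i) (some (i + 80))))
  PySem.Str.join "\n" paragraphs

-- ===== PRECONDITION & SPEC =====
def Spec_long_text_py (word_count : Int) (out : String) : Prop := out = long_text_py_alt word_count
instance (word_count : Int) (out : String) : Decidable (Spec_long_text_py word_count out) := by unfold Spec_long_text_py; infer_instance

-- ===== CLAIM (what is proved, stated in full; the proofs are below) =====
def Claim_equal_long_text_py : Prop := ∀ (word_count : Int), Dom_long_text_py word_count → Spec_long_text_py word_count (long_text_py word_count)

-- ===== LEMMAS AND PROOFS =====

-- common characterisation: the list of paragraph strings for n remaining words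
def chunks : Nat → List String
  | n =>
    if h : 0 < n then
      PySem.Str.join " " (List.replicate (min 80 n) "word") :: chunks (n - 80)
    else []
termination_by n => n
decreasing_by omega

theorem chunks_zero : chunks 0 = [] := by rw [chunks]; simp

theorem chunks_pos {n : Nat} (h : 0 < n) :
    chunks n = PySem.Str.join " " (List.replicate (min 80 n) "word") :: chunks (n - 80) := by
  rw [chunks]; simp [h]

-- A's loop produces the accumulator followed by chunks of the remaining count
theorem loopA_eq (ps : List String) (w : Int) : longTextLoopA ps w = ps ++ chunks w.toNat := by
  induction ps, w using longTextLoopA.induct with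
  | case1 ps w h ih =>
    rw [longTextLoopA]
    simp only [h, dite_true]
    rw [ih]
    have h1 : (w - min 80 w).toNat = w.toNat - 80 := by
      rw [min_def]; split_ifs <;> omega
    have h2 : (min 80 w).toNat = min 80 w.toNat := by
      rw [min_def, Nat.min_def]; split_ifs <;> omega
    rw [h1, h2, chunks_pos (show 0 < w.toNat by omega), List.append_assoc,
      List.singleton_append]
  | case2 ps w h =>
    rw [longTextLoopA]
    simp only [h, dite_false]
    have : w.toNat = 0 := by omega
    rw [this, chunks_zero, List.append_nil]

-- a [i:i+80] slice of a replicate list is a replicate of the clamped length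
theorem slice_replicate (n : Nat) (i : Int) (hi : 0 ≤ i) :
    PySem.List.slice (List.replicate n "word") (some i) (some (i + 80)) =
      List.replicate (min 80 (n - i.toNat)) "word" := by
  rw [PySem.List.slice_toNat _ hi (by omega)]
  have h80 : (i + 80).toNat - i.toNat = 80 := by omega
  rw [h80, List.drop_replicate, List.take_replicate]

-- one step of range(0, n, 80) for positive n
theorem pyRange80_cons (n : Int) (h : 0 < n) :
    PySem.List.pyRange 0 n 80 = 0 :: (PySem.List.pyRange 0 (n - 80) 80).map (· + 80) := by
  rw [PySem.List.pyRange_of_pos _ _ (by norm_num), PySem.List.pyRange_of_pos _ _ (by norm_num)]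
  have hc : (if (0:Int) < n then ((n - 0 + 80 - 1) / 80).toNat else 0) =
      (if (0:Int) < n - 80 then ((n - 80 - 0 + 80 - 1) / 80).toNat else 0) + 1 := by
    split_ifs <;> omega
  rw [hc, List.range_succ_eq_map]
  simp only [List.map_cons, List.map_map, Nat.cast_zero, mul_zero, zero_add]
  congr 1

-- range(0, n, 80) is empty for n ≤ 0
theorem pyRange80_nil {n : Int} (h : n ≤ 0) : PySem.List.pyRange 0 n 80 = [] := by
  rw [PySem.List.pyRange_of_pos _ _ (by norm_num)]
  have hn : ¬ ((0:Int) < n) := by omega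
  simp [hn]

-- B's comprehension equals chunks
theorem mapB_eq (n : Nat) :
    (PySem.List.pyRange 0 (n : Int) 80).map
        (fun i => PySem.Str.join " " (PySem.List.slice (List.replicate n "word") (some i) (some (i + 80)))) =
      chunks n := by
  induction n using Nat.strong_induction_on with
  | _ n ih =>
    by_cases h : 0 < n
    · rw [pyRange80_cons _ (by exact_mod_cast h), chunks_pos h]
      simp only [List.map_cons, List.map_map]
      congr 1
      · rw [slice_replicate n 0 le_rfl]
        simp
      · by_cases h80 : 80 < n
        · have hm : ((n : Int) - 80) = ((n - 80 : Nat) : Int) := by omega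
          rw [hm, ← ih (n - 80) (by omega)]
          apply List.map_congr_left
          intro i hi
          have hi0 : 0 ≤ i := by
            have := (PySem.List.mem_pyRange_iff_of_pos (by norm_num : (0:Int) < 80) i).mp hi
            omega
          simp only [Function.comp]
          rw [slice_replicate n (i + 80) (by omega), slice_replicate (n - 80) i hi0]
          have : n - (i + 80).toNat = n - 80 - i.toNat := by omega
          rw [this]
        · have hle : (n : Int) - 80 ≤ 0 := by omega
          rw [pyRange80_nil hle, List.map_nil]
          have : n - 80 = 0 := by omega
          rw [this, chunks_zero]
    · have h0 : n = 0 := by omega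
      subst h0
      simp only [Nat.cast_zero]
      rw [pyRange80_nil le_rfl, List.map_nil, chunks_zero]

-- ===== VERDICT (by name: the statement is the Claim_ definition above) =====
theorem long_text_py_spec : Claim_equal_long_text_py := by
  intro w _
  unfold Spec_long_text_py long_text_py long_text_py_alt
  rw [loopA_eq, List.nil_append]
  simp only [List.length_replicate]
  rw [mapB_eq]
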